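-- pv_equiv track=rewrite | github.com/ikenna-porter/itp-w1-create-box | create_box/main.py | create_box_empty
-- ===== SOURCE A (Python) =====
-- def create_box_empty(height, width, character):
--     if height <= 0 or width <= 0:
--         return "Invalid Entry"
--     box_string = ""
--     for row in range(height):
--         if row == 0 or row == height-1:
--             for column in range(width):
--                 box_string += character
--
--         else:
--             for column in range(width):
--                 if column == 0 or column == width-1:
--                     box_string += character
--                 else:
--                     box_string += " "
--         box_string += "\n"
--
--     return box_string
-- ===== SOURCE B (Python) =====
-- def create_box_empty(height, width, character):
--     if height <= 0 or width <= 0: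
--         return "Invalid Entry"
--     full = character * width
--     mid = character if width == 1 else character + " " * (width - 2) + character
--     rows = [full] + [mid] * (height - 2) + ([full] if height > 1 else [])
--     return "\n".join(rows) + "\n"
-- ===== Notes on version B (the rewrite author's own statement) =====
-- stated objective: simpler
-- what changed: B builds each row as a whole string by repetition (character*width, character+' '*(width-2)+character) and joins the row list with newlines, instead of A's nested per-character loops appending one character at a time.
import Mathlib
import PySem

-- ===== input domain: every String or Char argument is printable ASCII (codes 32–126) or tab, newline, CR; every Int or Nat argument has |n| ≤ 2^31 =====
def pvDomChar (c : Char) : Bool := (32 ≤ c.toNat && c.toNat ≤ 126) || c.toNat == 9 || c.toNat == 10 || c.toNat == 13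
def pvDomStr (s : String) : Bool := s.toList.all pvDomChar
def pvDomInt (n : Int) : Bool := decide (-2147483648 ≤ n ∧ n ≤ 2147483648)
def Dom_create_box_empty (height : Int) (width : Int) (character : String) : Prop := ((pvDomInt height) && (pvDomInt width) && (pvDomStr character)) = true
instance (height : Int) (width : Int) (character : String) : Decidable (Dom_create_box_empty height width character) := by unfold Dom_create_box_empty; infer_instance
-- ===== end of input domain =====

-- B builds each row as a whole string (character*width / character+' '*(width-2)+character) and
-- joins the rows with newlines, instead of A's nested per-character loops; objective: simpler.
-- Strings are handled on the List Char side (PySem convention); both ports wrap with String.ofList.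

-- ===== PORT A =====
-- A: nested loops, appending one copy of `character` (or a space) per column, '\n' per row.
def create_box_empty (height : Int) (width : Int) (character : String) : String :=
  if height ≤ 0 ∨ width ≤ 0 then "Invalid Entry"
  else
    String.ofList <|
      (PySem.List.pyRange 0 height 1).foldl (fun box_string row =>
        (if row = 0 ∨ row = height - 1 then
          (PySem.List.pyRange 0 width 1).foldl (fun b _ => b ++ character.toList) box_string
        else
          (PySem.List.pyRange 0 width 1).foldl (fun b column =>
            if column = 0 ∨ column = width - 1 then b ++ character.toList else b ++ [' ']) box_string)
        ++ ['\n']) []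

-- ===== PORT B =====
-- s * n (Python string repetition; n ≤ 0 gives "")
def pyStrMulChars (cs : List Char) (n : Int) : List Char := (List.replicate n.toNat cs).flatten

def create_box_empty_alt (height : Int) (width : Int) (character : String) : String :=
  if height ≤ 0 ∨ width ≤ 0 then "Invalid Entry"
  else
    let full := pyStrMulChars character.toList width
    let mid := if width = 1 then character.toList
               else character.toList ++ pyStrMulChars [' '] (width - 2) ++ character.toList
    let rows := [full] ++ List.replicate (height - 2).toNat mid ++
                (if height > 1 then [full] else [])
    String.ofList (PySem.Chars.join ['\n'] rows ++ ['\n'])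

-- ===== PRECONDITION & SPEC =====
def Spec_create_box_empty (height : Int) (width : Int) (character : String) (out : String) : Prop := out = create_box_empty_alt height width character
instance (height : Int) (width : Int) (character : String) (out : String) : Decidable (Spec_create_box_empty height width character out) := by unfold Spec_create_box_empty; infer_instance

-- ===== CLAIM (what is proved, stated in full; the proofs are below) =====
def Claim_equal_create_box_empty : Prop := ∀ (height : Int) (width : Int) (character : String), Dom_create_box_empty height width character → Spec_create_box_empty height width character (create_box_empty height width character)

-- ===== LEMMAS AND PROOFS =====

-- joining rows with '\n' and appending a final '\n' = concatenating (row ++ '\n') for each row (rows nonempty)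
theorem join_newline_flat (r : List Char) (rest : List (List Char)) :
    PySem.Chars.join ['\n'] (r :: rest) ++ ['\n'] = (r :: rest).flatMap (fun x => x ++ ['\n']) := by
  induction rest generalizing r with
  | nil => simp [PySem.Chars.join_singleton]
  | cons q rest ih =>
      rw [PySem.Chars.join_cons_cons]
      have h := ih q
      simp only [List.flatMap_cons, List.append_assoc] at h ⊢
      rw [h]

-- a row pattern keyed on the last index only
theorem map_last_eq (m : Nat) (full mid : List Char) :
    (List.range (m + 1)).map (fun i => if i = m then full else mid)
      = List.replicate m mid ++ [full] := by
  induction m with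
  | zero => simp
  | succ k ih =>
      rw [List.range_succ, List.map_append]
      have h : (List.range (k + 1)).map (fun i => if i = k + 1 then full else mid)
           = (List.range (k + 1)).map (fun _ => mid) := by
        apply List.map_congr_left
        intro i hi
        have : i < k + 1 := List.mem_range.mp hi
        simp [Nat.ne_of_lt this]
      rw [h]
      simp [List.replicate_succ']

-- the border pattern: indices 0 and n-1 give `full`, the rest `mid`
theorem rows_pattern (n : Nat) (hn : 1 ≤ n) (full mid : List Char) :
    (List.range n).map (fun i => if i = 0 ∨ i = n - 1 then full else mid)
      = [full] ++ List.replicate (n - 2) mid ++ (if 1 < n then [full] else []) := by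
  obtain ⟨m, rfl⟩ : ∃ m, n = m + 1 := ⟨n - 1, by omega⟩
  cases m with
  | zero => simp
  | succ k =>
      rw [List.range_succ_eq_map, List.map_cons, List.map_map]
      have h : ((fun i => if i = 0 ∨ i = k + 1 + 1 - 1 then full else mid) ∘ Nat.succ)
           = (fun i => if i = k then full else mid) := by
        funext i
        by_cases hi : i = k
        · simp [hi]
        · have h1 : i.succ ≠ 0 := Nat.succ_ne_zero i
          have h2 : i.succ ≠ k + 1 + 1 - 1 := by omega
          simp [Function.comp, h1, h2, hi]
      rw [h, map_last_eq]
      have h2 : k + 1 + 1 - 2 = k := by omega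
      have h3 : (1:Nat) < k + 1 + 1 := by omega
      simp [h2, h3, List.replicate_succ']

theorem flatMap_const_range (m : Nat) (cs : List Char) :
    (List.range m).flatMap (fun _ => cs) = (List.replicate m cs).flatten := by
  induction m with
  | zero => rfl
  | succ k ih =>
      rw [List.range_succ, List.flatMap_append, ih, List.replicate_succ']
      simp

-- ===== VERDICT (by name: the statement is the Claim_ definition above) =====
theorem create_box_empty_spec : Claim_equal_create_box_empty := by
  intro height width c _
  unfold Spec_create_box_empty create_box_empty create_box_empty_alt
  by_cases hb : height ≤ 0 ∨ width ≤ 0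
  · rw [if_pos hb, if_pos hb]
  · rw [if_neg hb, if_neg hb]
    push_neg at hb
    obtain ⟨hh, hw⟩ := hb
    obtain ⟨n, rfl⟩ : ∃ k : Nat, height = (k : Int) := ⟨height.toNat, by omega⟩
    obtain ⟨m, rfl⟩ : ∃ k : Nat, width = (k : Int) := ⟨width.toNat, by omega⟩
    have hn : 1 ≤ n := by exact_mod_cast hh
    have hm : 1 ≤ m := by exact_mod_cast hw
    -- the two row strings
    set full : List Char := pyStrMulChars c.toList (m : Int) with hfull
    set mid : List Char :=
      (if (m : Int) = 1 then c.toList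
       else c.toList ++ pyStrMulChars [' '] ((m : Int) - 2) ++ c.toList) with hmid
    -- A's outer fold body appends a whole row string
    have hA : (fun (box_string : List Char) (row : Int) =>
        (if row = 0 ∨ row = (n : Int) - 1 then
          (PySem.List.pyRange 0 (m : Int) 1).foldl (fun b _ => b ++ c.toList) box_string
        else
          (PySem.List.pyRange 0 (m : Int) 1).foldl (fun b column =>
            if column = 0 ∨ column = (m : Int) - 1 then b ++ c.toList else b ++ [' ']) box_string)
        ++ ['\n'])
        = fun box_string row => box_string ++
            ((if row = 0 ∨ row = (n : Int) - 1 then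
                (PySem.List.pyRange 0 (m : Int) 1).flatMap (fun _ => c.toList)
              else
                (PySem.List.pyRange 0 (m : Int) 1).flatMap (fun column =>
                  if column = 0 ∨ column = (m : Int) - 1 then c.toList else [' '])) ++ ['\n']) := by
      funext box row
      have e2 : (fun (b : List Char) (column : Int) =>
          if column = 0 ∨ column = (m : Int) - 1 then b ++ c.toList else b ++ [' '])
          = fun b column => b ++ (if column = 0 ∨ column = (m : Int) - 1 then c.toList else [' ']) := by
        funext b column; split <;> rfl
      rw [e2, PySem.List.foldl_append_eq_flatMap, PySem.List.foldl_append_eq_flatMap]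
      split <;> simp
    rw [hA, PySem.List.foldl_append_eq_flatMap, List.nil_append]
    -- A's full row equals B's `full`
    have hfull' : (PySem.List.pyRange 0 (m : Int) 1).flatMap (fun _ => c.toList) = full := by
      rw [PySem.List.pyRange_zero_natCast, List.flatMap_map, flatMap_const_range]
      simp [hfull, pyStrMulChars]
    -- A's interior row equals B's `mid`
    have hmid' : (PySem.List.pyRange 0 (m : Int) 1).flatMap (fun column =>
        if column = 0 ∨ column = (m : Int) - 1 then c.toList else [' ']) = mid := by
      rw [PySem.List.pyRange_zero_natCast, List.flatMap_map, List.flatMap_def]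
      have hcast : (List.range m).map (fun (i : Nat) => if (i : Int) = 0 ∨ (i : Int) = (m : Int) - 1 then c.toList else [' '])
          = (List.range m).map (fun i => if i = 0 ∨ i = m - 1 then c.toList else [' ']) := by
        apply List.map_congr_left
        intro i hi
        have him : i < m := List.mem_range.mp hi
        have hiff : ((i : Int) = 0 ∨ (i : Int) = (m : Int) - 1) ↔ (i = 0 ∨ i = m - 1) := by omega
        simp only [hiff]
      rw [hcast, rows_pattern m hm]
      by_cases h1 : m = 1
      · subst h1; simp [hmid]
      · have hm2 : 2 ≤ m := by omega
        have hmi : ¬ ((m : Int) = 1) := by omega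
        have h3 : 1 < m := by omega
        have h4 : ((m : Int) - 2).toNat = m - 2 := by omega
        simp [hmid, hmi, h3, pyStrMulChars, h4]
    rw [hfull', hmid']
    -- both sides are the concatenation of (row ++ '\n') over the same row list
    congr 1
    have hrows : full :: (List.replicate ((n : Int) - 2).toNat mid ++
        (if (n : Int) > 1 then [full] else []))
        = (List.range n).map (fun i => if i = 0 ∨ i = n - 1 then full else mid) := by
      rw [rows_pattern n hn]
      have h4 : ((n : Int) - 2).toNat = n - 2 := by omega
      by_cases h1 : 1 < n
      · have : (n : Int) > 1 := by omega
        simp [h4, h1, this]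
      · have : ¬ ((n : Int) > 1) := by omega
        simp [h4, h1, this]
    rw [show ([full] ++ List.replicate ((n : Int) - 2).toNat mid ++
        (if (n : Int) > 1 then [full] else []))
        = full :: (List.replicate ((n : Int) - 2).toNat mid ++
        (if (n : Int) > 1 then [full] else [])) from rfl]
    rw [join_newline_flat, hrows, List.flatMap_map]
    rw [PySem.List.pyRange_zero_natCast, List.flatMap_map]
    rw [List.flatMap_def, List.flatMap_def]
    congr 1
    apply List.map_congr_left
    intro i hi
    have him : i < n := List.mem_range.mp hi
    have hiff : ((i : Int) = 0 ∨ (i : Int) = (n : Int) - 1) ↔ (i = 0 ∨ i = n - 1) := by omega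
    simp only [hiff]
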